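-- pv_equiv track=rewrite | github.com/alexandraback/datacollection | solutions_1595491_0/Python/rfonseca/dancing.py | get_best
-- ===== SOURCE A (Python) =====
-- def get_best(triplets, smax, threshold, surprising):
--     t = None
--     for i, j, k, m, s in triplets:
--         if m >= threshold:
--             if s == False:
--                 return (i, j, k, s)
--             if surprising > 0:
--                 t = (i, j, k, s)
--     return t
-- ===== SOURCE B (Python) =====
-- def get_best(triplets, smax, threshold, surprising):
--     qualifying = [(i, j, k, s) for i, j, k, m, s in triplets if m >= threshold]
--     for item in qualifying:
--         if item[3] == False:
--             return item
--     if surprising > 0 and qualifying: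
--         return qualifying[-1]
--     return None
-- ===== Notes on version B (the rewrite author's own statement) =====
-- stated objective: simpler
-- what changed: Replaces A's fused single scan with early return and mutable fallback accumulator by a filter-then-two-phase selection: build the qualifying list once, search it for a non-surprising item, otherwise take its last element when surprising > 0.
import Mathlib
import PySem

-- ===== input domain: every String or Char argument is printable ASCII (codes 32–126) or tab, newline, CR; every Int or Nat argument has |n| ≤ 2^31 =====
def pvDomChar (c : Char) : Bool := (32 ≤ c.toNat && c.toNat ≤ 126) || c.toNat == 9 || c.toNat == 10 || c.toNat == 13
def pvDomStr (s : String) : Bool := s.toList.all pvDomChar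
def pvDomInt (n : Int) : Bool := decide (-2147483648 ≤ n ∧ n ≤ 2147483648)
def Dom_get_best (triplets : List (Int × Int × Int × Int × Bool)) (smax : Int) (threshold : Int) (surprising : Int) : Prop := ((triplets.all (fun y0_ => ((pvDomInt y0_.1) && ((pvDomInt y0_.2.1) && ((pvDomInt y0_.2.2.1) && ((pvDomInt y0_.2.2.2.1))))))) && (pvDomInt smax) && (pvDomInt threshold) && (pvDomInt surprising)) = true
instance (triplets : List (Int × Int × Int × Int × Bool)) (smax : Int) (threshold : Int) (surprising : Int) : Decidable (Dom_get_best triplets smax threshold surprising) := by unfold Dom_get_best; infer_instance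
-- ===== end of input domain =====

-- B replaces A's fused scan (early return + mutable fallback) with a filter-then-two-phase selection; objective: simpler.


-- ===== PORT A =====
-- A's for-loop with accumulator t and early return, step for step.
def getBestLoop (threshold surprising : Int) :
    List (Int × Int × Int × Int × Bool) → Option (Int × Int × Int × Bool) → Option (Int × Int × Int × Bool)
  | [], t => t
  | (i, j, k, m, s) :: rest, t =>
    if m ≥ threshold then
      if s = false then some (i, j, k, s)
      else if surprising > 0 then getBestLoop threshold surprising rest (some (i, j, k, s))
      else getBestLoop threshold surprising rest t
    else getBestLoop threshold surprising rest t

def get_best (triplets : List (Int × Int × Int × Int × Bool)) (smax : Int) (threshold : Int) (surprising : Int) : Option (Int × Int × Int × Bool) :=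
  getBestLoop threshold surprising triplets none

-- ===== PORT B =====
def get_best_alt (triplets : List (Int × Int × Int × Int × Bool)) (smax : Int) (threshold : Int) (surprising : Int) : Option (Int × Int × Int × Bool) :=
  let qualifying := (triplets.filter (fun y => y.2.2.2.1 ≥ threshold)).map (fun y => (y.1, y.2.1, y.2.2.1, y.2.2.2.2))
  match qualifying.find? (fun y => y.2.2.2 = false) with
  | some x => some x
  | none => if surprising > 0 ∧ qualifying ≠ [] then qualifying.getLast? else none

-- ===== PRECONDITION & SPEC =====
def Spec_get_best (triplets : List (Int × Int × Int × Int × Bool)) (smax : Int) (threshold : Int) (surprising : Int) (out : Option (Int × Int × Int × Bool)) : Prop := out = get_best_alt triplets smax threshold surprising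
instance (triplets : List (Int × Int × Int × Int × Bool)) (smax : Int) (threshold : Int) (surprising : Int) (out : Option (Int × Int × Int × Bool)) : Decidable (Spec_get_best triplets smax threshold surprising out) := by unfold Spec_get_best; infer_instance

-- ===== CLAIM (what is proved, stated in full; the proofs are below) =====
def Claim_equal_get_best : Prop := ∀ (triplets : List (Int × Int × Int × Int × Bool)) (smax : Int) (threshold : Int) (surprising : Int), Dom_get_best triplets smax threshold surprising → Spec_get_best triplets smax threshold surprising (get_best triplets smax threshold surprising)

-- ===== LEMMAS AND PROOFS =====

-- Proof-only helpers: the qualifying list and B's two-phase selection generalised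
-- by the accumulator t that A's loop threads.
def pvQual (threshold : Int) (l : List (Int × Int × Int × Int × Bool)) : List (Int × Int × Int × Bool) :=
  (l.filter (fun y => y.2.2.2.1 ≥ threshold)).map (fun y => (y.1, y.2.1, y.2.2.1, y.2.2.2.2))

def pvSelect (surprising : Int) (q : List (Int × Int × Int × Bool)) (t : Option (Int × Int × Int × Bool)) : Option (Int × Int × Int × Bool) :=
  match q.find? (fun y => y.2.2.2 = false) with
  | some x => some x
  | none => if surprising > 0 then (q.getLast?).or t else t

theorem pvQual_cons_pos (threshold i j k m : Int) (s : Bool) (tl : List (Int × Int × Int × Int × Bool))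
    (hm : m ≥ threshold) :
    pvQual threshold ((i, j, k, m, s) :: tl) = (i, j, k, s) :: pvQual threshold tl := by
  simp [pvQual, hm]

theorem pvQual_cons_neg (threshold i j k m : Int) (s : Bool) (tl : List (Int × Int × Int × Int × Bool))
    (hm : ¬ m ≥ threshold) :
    pvQual threshold ((i, j, k, m, s) :: tl) = pvQual threshold tl := by
  simp [pvQual, hm]

theorem pvSelect_cons_false (surprising i j k : Int) (q : List (Int × Int × Int × Bool))
    (t : Option (Int × Int × Int × Bool)) :
    pvSelect surprising ((i, j, k, false) :: q) t = some (i, j, k, false) := by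
  simp [pvSelect]

theorem pvSelect_cons_true (surprising i j k : Int) (q : List (Int × Int × Int × Bool))
    (t : Option (Int × Int × Int × Bool)) :
    pvSelect surprising ((i, j, k, true) :: q) t =
      if surprising > 0 then pvSelect surprising q (some (i, j, k, true))
      else pvSelect surprising q t := by
  unfold pvSelect
  have hf : List.find? (fun y : Int × Int × Int × Bool => decide (y.2.2.2 = false)) ((i, j, k, true) :: q)
      = List.find? (fun y : Int × Int × Int × Bool => decide (y.2.2.2 = false)) q := by
    simp
  rw [hf]
  cases hq : q.find? (fun y => y.2.2.2 = false) with
  | some x => simp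
  | none =>
    by_cases hs : surprising > 0
    · cases hg : q.getLast? with
      | some x => simp [hs, hg, List.getLast?_cons]
      | none =>
        have h0 : q = [] := List.getLast?_eq_none_iff.mp hg
        simp [hs, h0]
    · simp [hs]

theorem getBestLoop_eq (threshold surprising : Int)
    (l : List (Int × Int × Int × Int × Bool)) (t : Option (Int × Int × Int × Bool)) :
    getBestLoop threshold surprising l t = pvSelect surprising (pvQual threshold l) t := by
  induction l generalizing t with
  | nil => simp [getBestLoop, pvQual, pvSelect]
  | cons hd tl ih =>
    obtain ⟨i, j, k, m, s⟩ := hd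
    simp only [getBestLoop]
    by_cases hm : m ≥ threshold
    · rw [pvQual_cons_pos _ _ _ _ _ _ _ hm]
      cases s with
      | false => simp [hm, pvSelect_cons_false]
      | true =>
        rw [pvSelect_cons_true]
        by_cases hs : surprising > 0
        · simp [hm, hs, ih]
        · simp [hm, hs, ih]
    · rw [pvQual_cons_neg _ _ _ _ _ _ _ hm]
      simp [hm, ih]

-- ===== VERDICT (by name: the statement is the Claim_ definition above) =====
theorem get_best_spec : Claim_equal_get_best := by
  intro triplets smax threshold surprising _
  unfold Spec_get_best get_best
  rw [getBestLoop_eq]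
  unfold get_best_alt pvSelect pvQual
  set q := (triplets.filter (fun y => decide (y.2.2.2.1 ≥ threshold))).map
    (fun y => (y.1, y.2.1, y.2.2.1, y.2.2.2.2)) with hqq
  cases hq : q.find? (fun y => decide (y.2.2.2 = false)) with
  | some x => simp only [hq]
  | none =>
    simp only [hq]
    by_cases hne : q = []
    · simp [hne]
    · by_cases hs : surprising > 0
      · cases hg : q.getLast? with
        | some x => simp [hs, hne]
        | none => exact absurd (List.getLast?_eq_none_iff.mp hg) hne
      · simp [hs]
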